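-- pv_equiv track=rewrite | github.com/AlexTelon/ActivityTracker | activity_tracker/schedule.py | merge_consecutive_activities
-- ===== SOURCE A (Python) =====
-- from itertools import groupby
--
-- def merge_consecutive_activities(filtered_data):
--     merged_data = []
--
--     for _, group in groupby(filtered_data, key=lambda x: x[1]):
--         group_list = list(group)
--         start_dt, window_name = group_list[0]
--         end_dt, _ = group_list[-1]
--         merged_data.append((start_dt, end_dt, window_name))
--
--     return merged_data
-- ===== SOURCE B (Python) =====
-- def merge_consecutive_activities(filtered_data):
--     if not filtered_data:
--         return []
--     # staged passes over boundary flags: flags[i] is True iff a new run starts at i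
--     flags = [True] + [cur[1] != prev[1] for prev, cur in zip(filtered_data, filtered_data[1:])]
--     starts = [x for x, f in zip(filtered_data, flags) if f]
--     ends = [prev for prev, f in zip(filtered_data, flags[1:]) if f] + [filtered_data[-1]]
--     return [(s[0], e[0], s[1]) for s, e in zip(starts, ends)]
-- ===== Notes on version B (the rewrite author's own statement) =====
-- stated objective: alternative
-- what changed: Replaces itertools.groupby run accumulation with staged passes: build a boundary-flag list from adjacent pairs, filter the data by those flags into separate start and end lists, then zip them into intervals.
import Mathlib
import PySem

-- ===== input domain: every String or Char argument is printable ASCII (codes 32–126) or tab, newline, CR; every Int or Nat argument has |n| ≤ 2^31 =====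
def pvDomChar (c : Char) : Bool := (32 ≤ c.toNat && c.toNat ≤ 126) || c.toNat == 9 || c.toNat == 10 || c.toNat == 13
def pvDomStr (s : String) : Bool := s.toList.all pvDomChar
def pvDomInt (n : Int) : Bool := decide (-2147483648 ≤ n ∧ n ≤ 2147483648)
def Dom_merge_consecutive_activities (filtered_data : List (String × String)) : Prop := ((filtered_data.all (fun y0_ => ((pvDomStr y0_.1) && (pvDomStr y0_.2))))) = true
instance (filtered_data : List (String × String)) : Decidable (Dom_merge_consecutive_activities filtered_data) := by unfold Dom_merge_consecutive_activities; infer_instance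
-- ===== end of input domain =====

-- B replaces itertools.groupby by staged index-free passes: a boundary-flag list built
-- from adjacent pairs, then start/end lists filtered by those flags, zipped together;
-- same O(n) cost, an alternative decomposition with no run accumulator at all.

-- ===== PORT A =====
-- itertools.groupby(filtered_data, key=λ x, x[1]) as maximal runs of equal second
-- components, in order (exact model of groupby for this key on a list).
def pvGroupRuns : List (String × String) → List (List (String × String))
  | [] => []
  | x :: xs =>
    (x :: xs.takeWhile (fun y => y.2 == x.2)) :: pvGroupRuns (xs.dropWhile (fun y => y.2 == x.2))
  termination_by l => l.length
  decreasing_by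
    simp only [List.length_cons]
    exact Nat.lt_succ_of_le (xs.length_dropWhile_le _)

-- the loop body: group_list[0] gives (start_dt, window_name), group_list[-1] gives end_dt
def merge_consecutive_activities (filtered_data : List (String × String)) : List (String × String × String) :=
  (pvGroupRuns filtered_data).map
    (fun g => ((g.headD ("", "")).1, (g.getLastD ("", "")).1, (g.headD ("", "")).2))

-- ===== PORT B =====
-- flags[1:] of Source B: one boolean per adjacent pair, True where the activity changes
def pvFlagsTail (xs : List (String × String)) : List Bool :=
  (xs.zip xs.tail).map (fun pc => pc.2.2 != pc.1.2)

-- Source B: flags = [True] + pairflags; starts/ends filtered by the flags; zip and project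
def merge_consecutive_activities_alt (filtered_data : List (String × String)) : List (String × String × String) :=
  match filtered_data with
  | [] => []
  | _ =>
    let starts := ((filtered_data.zip (true :: pvFlagsTail filtered_data)).filter (fun sf => sf.2)).map (fun sf => sf.1)
    let ends := (((filtered_data.zip (pvFlagsTail filtered_data)).filter (fun pf => pf.2)).map (fun pf => pf.1))
                  ++ [filtered_data.getLastD ("", "")]
    (starts.zip ends).map (fun se => (se.1.1, se.2.1, se.1.2))

-- ===== PRECONDITION & SPEC =====
def Spec_merge_consecutive_activities (filtered_data : List (String × String)) (out : List (String × String × String)) : Prop := out = merge_consecutive_activities_alt filtered_data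
instance (filtered_data : List (String × String)) (out : List (String × String × String)) : Decidable (Spec_merge_consecutive_activities filtered_data out) := by unfold Spec_merge_consecutive_activities; infer_instance

-- ===== CLAIM (what is proved, stated in full; the proofs are below) =====
def Claim_equal_merge_consecutive_activities : Prop := ∀ (filtered_data : List (String × String)), Dom_merge_consecutive_activities filtered_data → Spec_merge_consecutive_activities filtered_data (merge_consecutive_activities filtered_data)

-- ===== LEMMAS AND PROOFS =====

-- replace the start of the first interval
def pvWithStart (s : String) : List (String × String × String) → List (String × String × String)
  | [] => []
  | (_, b, c) :: t => (s, b, c) :: t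

-- both programs satisfy the same two-step recurrence; first for A
theorem A_rec (x y : String × String) (xs : List (String × String)) :
    merge_consecutive_activities (x :: y :: xs) =
      if y.2 == x.2 then pvWithStart x.1 (merge_consecutive_activities (y :: xs))
      else (x.1, x.1, x.2) :: merge_consecutive_activities (y :: xs) := by
  by_cases h : y.2 = x.2
  · rw [if_pos (by simp [h])]
    simp only [merge_consecutive_activities]
    conv_lhs => rw [pvGroupRuns]
    conv_rhs => rw [pvGroupRuns]
    simp only [List.takeWhile, List.dropWhile, h, beq_self_eq_true, List.map, pvWithStart]
    simp [h]
  · rw [if_neg (by simpa using h)]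
    have hb : (y.2 == x.2) = false := by simpa using h
    simp only [merge_consecutive_activities]
    conv_lhs => rw [pvGroupRuns]
    simp [List.takeWhile, List.dropWhile, hb]

theorem pvFlagsTail_cons (x y : String × String) (xs : List (String × String)) :
    pvFlagsTail (x :: y :: xs) = (y.2 != x.2) :: pvFlagsTail (y :: xs) := by
  simp [pvFlagsTail]

theorem B_rec (x y : String × String) (xs : List (String × String)) :
    merge_consecutive_activities_alt (x :: y :: xs) =
      if y.2 == x.2 then pvWithStart x.1 (merge_consecutive_activities_alt (y :: xs))
      else (x.1, x.1, x.2) :: merge_consecutive_activities_alt (y :: xs) := by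
  simp only [merge_consecutive_activities_alt, pvFlagsTail_cons]
  by_cases h : y.2 = x.2
  · have hb : (y.2 != x.2) = false := by simp [h]
    rw [if_pos (by simp [h])]
    simp only [hb, List.zip_cons_cons, List.filter, List.map, List.getLastD_cons]
    -- both sides: zip (x or y :: S) (E ++ [last]); E ++ [last] is a cons
    cases hE : (((y :: xs).zip (pvFlagsTail (y :: xs))).filter (fun pf => pf.2)).map (fun pf => pf.1) ++ [xs.getLastD y] with
    | nil => simp at hE
    | cons e T => simp [pvWithStart, h]
  · have hb : (y.2 != x.2) = true := by simp [h]
    rw [if_neg (by simpa using h)]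
    simp [hb, List.zip_cons_cons, List.filter]

-- ===== VERDICT (by name: the statement is the Claim_ definition above) =====
theorem pvAB_eq (filtered_data : List (String × String)) :
    merge_consecutive_activities filtered_data = merge_consecutive_activities_alt filtered_data := by
  induction filtered_data with
  | nil => simp [merge_consecutive_activities, pvGroupRuns, merge_consecutive_activities_alt]
  | cons x rest ih =>
    cases rest with
    | nil =>
      simp [merge_consecutive_activities, pvGroupRuns, merge_consecutive_activities_alt,
        pvFlagsTail]
    | cons y xs =>
      rw [A_rec, B_rec, ih]

theorem merge_consecutive_activities_spec : Claim_equal_merge_consecutive_activities :=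
  fun filtered_data _ => pvAB_eq filtered_data
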